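-- pv_equiv track=rewrite | github.com/MrTypeError/DSA | Heaps/Maximum_Possible_Product_After_K_Operations.py | solve
-- ===== SOURCE A (Python) =====
-- import heapq
--
-- def solve(n, nums, k):
--     heapq.heapify(nums)
--     for el in range(k):
--         ans = nums[0]+1
--         heapq.heappop(nums)
--         heapq.heappush(nums,ans)
--     rr = 1
--     for i in nums:
--         rr *= i
--
--     return rr%(10**9+7) if rr>10**9+7 else rr
-- ===== SOURCE B (Python) =====
-- def solve(n, nums, k):
--     # Sorted-list simulation instead of a heap: keep the multiset as a sorted
--     # list; each operation takes the head (the minimum) and re-inserts head+1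
--     # at its ordered position.  (A mutates `nums` in place; B does not.)
--     arr = sorted(nums)
--     for _ in range(k):
--         m = arr[0] + 1
--         rest = arr[1:]
--         out = []
--         i = 0
--         while i < len(rest) and rest[i] < m:
--             out.append(rest[i])
--             i += 1
--         arr = out + [m] + rest[i:]
--     p = 1
--     for v in arr:
--         p *= v
--     return p % (10 ** 9 + 7) if p > 10 ** 9 + 7 else p
-- ===== Notes on version B (the rewrite author's own statement) =====
-- stated objective: alternative
-- what changed: B replaces the binary heap (heapify + k heappop/heappush sift operations) with a sorted list kept ordered by linear ordered insertion: sort once, then each of the k operations takes the head (the minimum) and re-inserts head+1 at its ordered position; the product and conditional modulus are unchanged.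
import Mathlib
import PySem

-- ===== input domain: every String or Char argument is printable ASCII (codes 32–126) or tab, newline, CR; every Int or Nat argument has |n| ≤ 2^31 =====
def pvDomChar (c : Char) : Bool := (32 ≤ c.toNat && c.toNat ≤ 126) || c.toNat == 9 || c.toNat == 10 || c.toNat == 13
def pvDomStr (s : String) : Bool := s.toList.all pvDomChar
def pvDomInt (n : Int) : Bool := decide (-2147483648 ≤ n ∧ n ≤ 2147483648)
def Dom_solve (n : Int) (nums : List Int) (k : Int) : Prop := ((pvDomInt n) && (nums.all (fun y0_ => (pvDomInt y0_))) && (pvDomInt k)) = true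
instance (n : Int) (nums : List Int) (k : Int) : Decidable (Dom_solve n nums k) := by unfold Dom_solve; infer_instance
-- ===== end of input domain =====

-- B replaces A's binary heap with a sorted list maintained by ordered insertion (objective: alternative).
-- A mutates `nums` in place (heapify/heappop/heappush); the equivalence proved here is about the return value only.

-- ===== PORT A =====
-- A calls heapq.heapify/heappop/heappush, which PySem does not cover; they are ported by hand below as the
-- standard array-encoded binary min-heap sift operations over the list (hGet i reads index i; every read an
-- in-range index on Pre_ inputs, so the 0 default never shows); exact for solve's returned value.
def hGet (l : List Int) (i : Nat) : Int := l.getD i 0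

-- index of the smaller child of node i if it beats node i, else i (pick1: left child only)
def pick1 (l : List Int) (i : Nat) : Nat :=
  if 2*i+1 < l.length ∧ hGet l (2*i+1) < hGet l i then 2*i+1 else i

def pickChild (l : List Int) (i : Nat) : Nat :=
  if 2*i+2 < l.length ∧ hGet l (2*i+2) < hGet l (pick1 l i) then 2*i+2 else pick1 l i

-- termination fact for siftDown (cited by its decreasing_by)
theorem pickChild_ne_bounds (l : List Int) (i : Nat) (h : pickChild l i ≠ i) :
    i < pickChild l i ∧ pickChild l i < l.length := by
  unfold pickChild pick1 at *
  split_ifs at * <;> omega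

def siftDown (l : List Int) (i : Nat) : List Int :=
  if h : pickChild l i = i then l
  else siftDown ((l.set i (hGet l (pickChild l i))).set (pickChild l i) (hGet l i)) (pickChild l i)
termination_by l.length - i
decreasing_by
  have := pickChild_ne_bounds l i h
  simp only [List.length_set]
  omega

def siftUp (l : List Int) (i : Nat) : List Int :=
  if 0 < i then
    if hGet l i < hGet l ((i-1)/2) then
      siftUp ((l.set i (hGet l ((i-1)/2))).set ((i-1)/2) (hGet l i)) ((i-1)/2)
    else l
  else l
termination_by i
decreasing_by omega

def heapify (l : List Int) : List Int := ((List.range (l.length / 2)).reverse).foldl siftDown l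

def heappush (l : List Int) (x : Int) : List Int := siftUp (l ++ [x]) l.length

def heappop (l : List Int) : Int × List Int :=
  let lastelt := l.getLast?.getD 0
  let rest := l.dropLast
  if rest.isEmpty then (lastelt, [])
  else (hGet rest 0, siftDown (rest.set 0 lastelt) 0)

def solve (n : Int) (nums : List Int) (k : Int) : Int :=
  let h0 := heapify nums
  let hk := (PySem.List.pyRange 0 k 1).foldl
    (fun h _ => heappush (heappop h).2 (hGet h 0 + 1)) h0
  let rr := hk.foldl (fun r i => r * i) 1
  if rr > 1000000007 then PySem.Int.mod rr 1000000007 else rr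

-- ===== PORT B =====
-- the `while i < len(rest) and rest[i] < m` insertion loop of Source B, as structural recursion
def insSorted : List Int → Int → List Int
  | [], m => [m]
  | x :: xs, m => if x < m then x :: insSorted xs m else m :: x :: xs

def solve_alt (n : Int) (nums : List Int) (k : Int) : Int :=
  let arr0 := PySem.List.sorted nums (fun x => x) false
  let ak := (PySem.List.pyRange 0 k 1).foldl
    (fun a _ => insSorted (PySem.List.slice a (some 1) none) ((PySem.List.pyGet? a 0).getD 0 + 1)) arr0
  let p := ak.foldl (fun r v => r * v) 1
  if p > 1000000007 then PySem.Int.mod p 1000000007 else p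

-- ===== PRECONDITION & SPEC =====
-- Pre_ excludes exactly the inputs on which A raises: nums = [] with k ≥ 1 (nums[0] is an IndexError there).
def Pre_solve (n : Int) (nums : List Int) (k : Int) : Prop := k ≤ 0 ∨ nums ≠ []
instance (n : Int) (nums : List Int) (k : Int) : Decidable (Pre_solve n nums k) := by unfold Pre_solve; infer_instance

def pvWitness_solve : Int × List Int × Int := (3, [1, 2, 3], 4)

def Spec_solve (n : Int) (nums : List Int) (k : Int) (out : Int) : Prop := out = solve_alt n nums k
instance (n : Int) (nums : List Int) (k : Int) (out : Int) : Decidable (Spec_solve n nums k out) := by unfold Spec_solve; infer_instance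

-- ===== CLAIM (what is proved, stated in full; the proofs are below) =====
def Claim_equal_solve : Prop := ∀ (n : Int) (nums : List Int) (k : Int), Dom_solve n nums k → Pre_solve n nums k → Spec_solve n nums k (solve n nums k)

-- ===== LEMMAS AND PROOFS =====

theorem hGet_set_self (l : List Int) (i : Nat) (x : Int) (h : i < l.length) :
    hGet (l.set i x) i = x := by
  simp [hGet, List.getD_eq_getElem?_getD, h]

theorem hGet_set_ne (l : List Int) (i j : Nat) (x : Int) (h : i ≠ j) :
    hGet (l.set i x) j = hGet l j := by
  simp [hGet, List.getD_eq_getElem?_getD, List.getElem?_set_ne h]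

theorem pickChild_min (l : List Int) (i c : Nat) (hc : c = 2*i+1 ∨ c = 2*i+2)
    (hcl : c < l.length) : hGet l (pickChild l i) ≤ hGet l c := by
  unfold pickChild pick1 at *
  split_ifs with h1 h2 h2 <;> simp only [not_and, not_lt] at * <;>
    rcases hc with rfl | rfl <;>
    first | linarith | omega | linarith [h1 hcl] | linarith [h2 hcl]

theorem pickChild_lt (l : List Int) (i : Nat) (h : pickChild l i ≠ i) :
    hGet l (pickChild l i) < hGet l i := by
  unfold pickChild pick1 at *
  split_ifs at * with h1 h2 h2 <;> (try simp only [not_and, not_lt] at *) <;>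
    first | omega | linarith | linarith [h1 h2.1]

theorem pickChild_child (l : List Int) (i : Nat) (h : pickChild l i ≠ i) :
    pickChild l i = 2*i+1 ∨ pickChild l i = 2*i+2 := by
  unfold pickChild pick1 at *; split_ifs at * <;> omega

def okFrom (l : List Int) (m : Nat) : Prop :=
  ∀ j, 0 < j → j < l.length → m ≤ (j-1)/2 → hGet l ((j-1)/2) ≤ hGet l j

theorem siftDown_ok (l : List Int) (c : Nat) : ∀ m, m ≤ c →
    (∀ j, 0 < j → j < l.length → m ≤ (j-1)/2 → (j-1)/2 ≠ c → hGet l ((j-1)/2) ≤ hGet l j) →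
    (∀ j, 0 < j → j < l.length → (j-1)/2 = c → 0 < c → m ≤ (c-1)/2 → hGet l ((c-1)/2) ≤ hGet l j) →
    okFrom (siftDown l c) m := by
  fun_induction siftDown l c with
  | case1 l i hpc =>
      intro m hmc h1 h2 j hj hjl hmj
      by_cases hpj : (j-1)/2 = i
      · have := pickChild_min l i j (by omega) hjl
        rw [hpc] at this; rw [hpj]; exact this
      · exact h1 j hj hjl hmj hpj
  | case2 l i hne ih =>
      intro m hmc h1 h2
      obtain ⟨his, hsl⟩ := pickChild_ne_bounds l i hne
      have hchild := pickChild_child l i hne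
      have hlt := pickChild_lt l i hne
      have hil : i < l.length := by omega
      have g1 : hGet ((l.set i (hGet l (pickChild l i))).set (pickChild l i) (hGet l i)) (pickChild l i) = hGet l i := by
        rw [hGet_set_self]; simpa using hsl
      have g2 : hGet ((l.set i (hGet l (pickChild l i))).set (pickChild l i) (hGet l i)) i = hGet l (pickChild l i) := by
        rw [hGet_set_ne _ _ _ _ (by omega), hGet_set_self _ _ _ hil]
      have g3 : ∀ j, j ≠ i → j ≠ pickChild l i →
          hGet ((l.set i (hGet l (pickChild l i))).set (pickChild l i) (hGet l i)) j = hGet l j := by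
        intro j hji hjs
        rw [hGet_set_ne _ _ _ _ (by omega), hGet_set_ne _ _ _ _ (by omega)]
      have hpsi : (pickChild l i - 1)/2 = i := by rcases hchild with h|h <;> omega
      refine ih m (by omega) ?_ ?_
      · intro j hj hjl hmj hpjne
        rw [List.length_set, List.length_set] at hjl
        by_cases hjs : j = pickChild l i
        · subst hjs; rw [hpsi, g1, g2]; exact le_of_lt hlt
        · by_cases hjc : j = i
          · subst hjc
            rw [g2, g3 _ (by omega) (by omega)]
            exact h2 (pickChild l j) (by omega) hsl hpsi (by omega) (by omega)
          · by_cases hpjc : (j-1)/2 = i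
            · rw [hpjc, g2, g3 j hjc hjs]
              exact pickChild_min l i j (by omega) hjl
            · rw [g3 j hjc hjs, g3 _ hpjc hpjne]
              exact h1 j hj hjl hmj hpjc
      · intro j hj hjl hpj h0s hms
        rw [List.length_set, List.length_set] at hjl
        rw [hpsi, g2, g3 j (by omega) (by omega)]
        have := h1 j hj hjl (by omega) (by rw [hpj]; omega)
        rwa [hpj] at this

theorem mset_set (l : List Int) (i : Nat) (x : Int) (h : i < l.length) :
    (↑(l.set i x) : Multiset Int) + {hGet l i} = (↑l : Multiset Int) + {x} := by
  induction l generalizing i with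
  | nil => simp at h
  | cons a t ih =>
      cases i with
      | zero =>
          simp only [List.set_cons_zero, ← Multiset.cons_coe, ← Multiset.singleton_add, hGet,
            List.getD_cons_zero]
          abel
      | succ i =>
          have ht : i < t.length := by simpa using h
          have hrec := ih i ht
          simp only [List.set_cons_succ, ← Multiset.cons_coe, ← Multiset.singleton_add, hGet,
            List.getD_cons_succ] at *
          rw [add_assoc, hrec, ← add_assoc]

theorem mset_swap (l : List Int) (i j : Nat) (hi : i < l.length) (hj : j < l.length) (hij : i ≠ j) :
    (↑((l.set i (hGet l j)).set j (hGet l i)) : Multiset Int) = (↑l : Multiset Int) := by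
  have h1 := mset_set l i (hGet l j) hi
  have h2 := mset_set (l.set i (hGet l j)) j (hGet l i) (by simpa using hj)
  rw [hGet_set_ne l i j _ hij] at h2
  have : (↑((l.set i (hGet l j)).set j (hGet l i)) : Multiset Int) + {hGet l j}
       = (↑l : Multiset Int) + {hGet l j} := by
    rw [h2, h1]
  exact add_right_cancel this

theorem mset_siftDown (l : List Int) (i : Nat) :
    (↑(siftDown l i) : Multiset Int) = (↑l : Multiset Int) := by
  fun_induction siftDown l i with
  | case1 => rfl
  | case2 l i h ih =>
      have hb := pickChild_ne_bounds l i h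
      rw [ih, mset_swap l i (pickChild l i) (by omega) hb.2 (by omega)]

def hp (l : List Int) : Prop :=
  ∀ j, 0 < j → j < l.length → hGet l ((j-1)/2) ≤ hGet l j

theorem hp_of_okFrom {l : List Int} (h : okFrom l 0) : hp l :=
  fun j hj hjl => h j hj hjl (Nat.zero_le _)

theorem heapify_aux (i : Nat) : ∀ (l : List Int), okFrom l i →
    okFrom (((List.range i).reverse).foldl siftDown l) 0 := by
  induction i with
  | zero => intro l h; simpa using h
  | succ i ih =>
      intro l h
      rw [List.range_succ, List.reverse_append]
      simp only [List.reverse_singleton, List.singleton_append, List.foldl_cons]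
      apply ih
      apply siftDown_ok l i i le_rfl
      · intro j hj hjl hmj hne
        exact h j hj hjl (by omega)
      · intro j hj hjl hpj h0 hmi
        exfalso; omega

theorem heapify_hp (l : List Int) : hp (heapify l) := by
  apply hp_of_okFrom
  apply heapify_aux
  intro j hj hjl hmj
  exfalso; omega

theorem mset_heapify (l : List Int) : (↑(heapify l) : Multiset Int) = (↑l : Multiset Int) := by
  unfold heapify
  generalize (List.range (l.length / 2)).reverse = L
  induction L generalizing l with
  | nil => rfl
  | cons a t ih => simp only [List.foldl_cons]; rw [ih, mset_siftDown]

theorem mset_siftUp (l : List Int) (i : Nat) : i < l.length →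
    (↑(siftUp l i) : Multiset Int) = (↑l : Multiset Int) := by
  fun_induction siftUp l i with
  | case1 l i h0 hlt ih =>
      intro hi
      rw [ih (by simp; omega), mset_swap l i ((i-1)/2) hi (by omega) (by omega)]
  | case2 => intro _; rfl
  | case3 => intro _; rfl

theorem siftUp_hp (l : List Int) (c : Nat) : c < l.length →
    (∀ j, 0 < j → j < l.length → j ≠ c → hGet l ((j-1)/2) ≤ hGet l j) →
    (∀ j, 0 < j → j < l.length → (j-1)/2 = c → 0 < c → hGet l ((c-1)/2) ≤ hGet l j) →
    hp (siftUp l c) := by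
  fun_induction siftUp l c with
  | case2 l c h0 hnlt =>
      intro hc h1 h2 j hj hjl
      by_cases hjc : j = c
      · subst hjc; exact le_of_not_gt hnlt
      · exact h1 j hj hjl hjc
  | case3 l c h0 =>
      intro hc h1 h2 j hj hjl
      exact h1 j hj hjl (by omega)
  | case1 l c h0 hlt ih =>
      intro hc h1 h2
      have hpl : (c-1)/2 < l.length := by omega
      have gp : hGet ((l.set c (hGet l ((c-1)/2))).set ((c-1)/2) (hGet l c)) ((c-1)/2) = hGet l c := by
        rw [hGet_set_self]; simpa using hpl
      have gc : hGet ((l.set c (hGet l ((c-1)/2))).set ((c-1)/2) (hGet l c)) c = hGet l ((c-1)/2) := by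
        rw [hGet_set_ne _ _ _ _ (by omega), hGet_set_self _ _ _ hc]
      have g3 : ∀ j, j ≠ c → j ≠ (c-1)/2 →
          hGet ((l.set c (hGet l ((c-1)/2))).set ((c-1)/2) (hGet l c)) j = hGet l j := by
        intro j h1' h2'
        rw [hGet_set_ne _ _ _ _ (by omega), hGet_set_ne _ _ _ _ (by omega)]
      refine ih (by simp; omega) ?_ ?_
      · intro j hj hjl hjp
        rw [List.length_set, List.length_set] at hjl
        by_cases hjc : j = c
        · subst hjc; rw [show (j-1)/2 = (j-1)/2 from rfl, gp, gc]; exact le_of_lt hlt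
        · by_cases hpjc : (j-1)/2 = c
          · rw [hpjc, gc, g3 j hjc (by omega)]
            exact h2 j hj hjl hpjc h0
          · by_cases hpjp : (j-1)/2 = (c-1)/2
            · rw [hpjp, gp, g3 j hjc hjp]
              have := h1 j hj hjl hjc
              rw [hpjp] at this
              linarith
            · rw [g3 j hjc hjp, g3 _ hpjc hpjp]
              exact h1 j hj hjl hjc
      · intro j hj hjl hpj hp0
        rw [List.length_set, List.length_set] at hjl
        have hppne : ((c-1)/2-1)/2 ≠ c := by omega
        have hppne2 : ((c-1)/2-1)/2 ≠ (c-1)/2 := by omega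
        rw [g3 _ hppne hppne2]
        by_cases hjc : j = c
        · subst hjc
          rw [gc]
          exact h1 ((j-1)/2) (by omega) (by omega) (by omega)
        · rw [g3 j hjc (by omega)]
          have ha : hGet l (((c-1)/2-1)/2) ≤ hGet l ((c-1)/2) := h1 ((c-1)/2) (by omega) (by omega) (by omega)
          have hb : hGet l ((c-1)/2) ≤ hGet l j := by
            have := h1 j hj hjl hjc
            rwa [hpj] at this
          linarith

theorem hGet_append_lt (l : List Int) (x : Int) (j : Nat) (h : j < l.length) :
    hGet (l ++ [x]) j = hGet l j := by
  simp [hGet, List.getD_eq_getElem?_getD, List.getElem?_append_left h]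

theorem heappush_hp (l : List Int) (x : Int) (h : hp l) : hp (heappush l x) := by
  apply siftUp_hp
  · simp
  · intro j hj hjl hjc
    simp only [List.length_append, List.length_singleton] at hjl
    have hjl' : j < l.length := by omega
    rw [hGet_append_lt _ _ _ hjl', hGet_append_lt _ _ _ (by omega)]
    exact h j hj hjl'
  · intro j hj hjl hpj h0
    simp only [List.length_append, List.length_singleton] at hjl
    exfalso; omega

theorem mset_heappush (l : List Int) (x : Int) :
    (↑(heappush l x) : Multiset Int) = x ::ₘ (↑l : Multiset Int) := by
  unfold heappush
  rw [mset_siftUp _ _ (by simp)]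
  simp

theorem hGet_dropLast (l : List Int) (j : Nat) (h : j < l.length - 1) :
    hGet l.dropLast j = hGet l j := by
  have h1 : j < l.dropLast.length := by
    have : l.dropLast.length = l.length - 1 := List.length_dropLast
    omega
  have h2 : j < l.length := by omega
  simp [hGet, List.getD_eq_getElem?_getD, List.getElem?_eq_getElem h1, List.getElem?_eq_getElem h2,
    List.getElem_dropLast]

theorem dropLast_len {l : List Int} : l.dropLast.length = l.length - 1 := List.length_dropLast

theorem heappop_fst (l : List Int) (h : l ≠ []) : (heappop l).1 = hGet l 0 := by
  unfold heappop
  by_cases he : l.dropLast.isEmpty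
  · rw [if_pos he]
    have h1 : l.length = 1 := by
      have h0 : l.dropLast.length = 0 := by
        rw [List.isEmpty_iff] at he; simp [he]
      have hl : l.length ≠ 0 := by simpa [List.length_eq_zero_iff] using h
      have := dropLast_len (l := l)
      omega
    obtain ⟨a, rfl⟩ := List.length_eq_one_iff.mp h1
    simp [hGet]
  · rw [if_neg he]
    have hlen : 2 ≤ l.length := by
      rw [List.isEmpty_iff] at he
      have h0 : l.dropLast.length ≠ 0 := fun hz => he (List.length_eq_zero_iff.mp hz)
      have := dropLast_len (l := l)
      omega
    exact hGet_dropLast l 0 (by omega)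

theorem mset_heappop (l : List Int) (h : l ≠ []) :
    (↑l : Multiset Int) = (heappop l).1 ::ₘ (↑(heappop l).2 : Multiset Int) := by
  unfold heappop
  by_cases he : l.dropLast.isEmpty
  · rw [if_pos he]
    have h1 : l.length = 1 := by
      have h0 : l.dropLast.length = 0 := by
        rw [List.isEmpty_iff] at he; simp [he]
      have hl : l.length ≠ 0 := by simpa [List.length_eq_zero_iff] using h
      have := dropLast_len (l := l)
      omega
    obtain ⟨a, rfl⟩ := List.length_eq_one_iff.mp h1
    simp
  · rw [if_neg he]
    have hlen : 2 ≤ l.length := by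
      rw [List.isEmpty_iff] at he
      have h0 : l.dropLast.length ≠ 0 := fun hz => he (List.length_eq_zero_iff.mp hz)
      have := dropLast_len (l := l)
      omega
    have hsplit : l.dropLast ++ [l.getLast h] = l := List.dropLast_append_getLast h
    have hg : l.getLast?.getD 0 = l.getLast h := by rw [List.getLast?_eq_getLast h]; rfl
    have hcoe : (↑l : Multiset Int) = (↑l.dropLast : Multiset Int) + {l.getLast?.getD 0} := by
      conv_lhs => rw [← hsplit]
      rw [← Multiset.coe_add, Multiset.coe_singleton, hg]
    have hset := mset_set l.dropLast 0 (l.getLast?.getD 0)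
      (by have := dropLast_len (l := l); omega)
    rw [mset_siftDown, ← Multiset.singleton_add, add_comm, hset]
    exact hcoe

theorem heappop_hp (l : List Int) (h : l ≠ []) (hh : hp l) : hp (heappop l).2 := by
  unfold heappop
  by_cases he : l.dropLast.isEmpty
  · rw [if_pos he]
    intro j hj hjl; simp at hjl
  · rw [if_neg he]
    have hlen : 2 ≤ l.length := by
      rw [List.isEmpty_iff] at he
      have h0 : l.dropLast.length ≠ 0 := fun hz => he (List.length_eq_zero_iff.mp hz)
      have := dropLast_len (l := l)
      omega
    apply hp_of_okFrom
    apply siftDown_ok _ 0 0 le_rfl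
    · intro j hj hjl hmj hne
      rw [List.length_set, dropLast_len] at hjl
      rw [hGet_set_ne _ _ _ _ (by omega), hGet_set_ne _ _ _ _ (by omega),
          hGet_dropLast _ _ (by omega), hGet_dropLast _ _ (by omega)]
      exact hh j hj (by omega)
    · intro j hj hjl hpj h0 hm
      exfalso; omega

theorem hp_root_min (l : List Int) (hh : hp l) : ∀ x ∈ l, hGet l 0 ≤ x := by
  have aux : ∀ j, j < l.length → hGet l 0 ≤ hGet l j := by
    intro j
    induction j using Nat.strong_induction_on with
    | _ j ih =>
        intro hjl
        rcases Nat.eq_zero_or_pos j with rfl | hj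
        · exact le_rfl
        · exact le_trans (ih ((j-1)/2) (by omega) (by omega)) (hh j hj hjl)
  intro x hx
  obtain ⟨j, hjl, rfl⟩ := List.mem_iff_getElem.mp hx
  have : hGet l j = l[j] := by
    simp [hGet, List.getD_eq_getElem?_getD, List.getElem?_eq_getElem hjl]
  rw [← this]
  exact aux j hjl

theorem mset_insSorted (l : List Int) (m : Int) :
    (↑(insSorted l m) : Multiset Int) = m ::ₘ (↑l : Multiset Int) := by
  induction l with
  | nil => rfl
  | cons x t ih =>
      show (↑(if x < m then x :: insSorted t m else m :: x :: t) : Multiset Int) = _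
      split_ifs with hxm
      · simp only [← Multiset.cons_coe, ih, Multiset.cons_swap]
      · simp only [← Multiset.cons_coe]

theorem mem_insSorted (l : List Int) (m y : Int) (h : y ∈ insSorted l m) : y = m ∨ y ∈ l := by
  have : y ∈ (↑(insSorted l m) : Multiset Int) := Multiset.mem_coe.mpr h
  rw [mset_insSorted] at this
  simpa using this

theorem insSorted_pairwise (l : List Int) (m : Int) (h : l.Pairwise (· ≤ ·)) :
    (insSorted l m).Pairwise (· ≤ ·) := by
  induction l with
  | nil => simp [insSorted]
  | cons x t ih =>
      show (if x < m then x :: insSorted t m else m :: x :: t).Pairwise (· ≤ ·)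
      obtain ⟨hx, ht⟩ := List.pairwise_cons.mp h
      split_ifs with hxm
      · refine List.pairwise_cons.mpr ⟨?_, ih ht⟩
        intro y hy
        rcases mem_insSorted t m y hy with rfl | hy'
        · exact le_of_lt hxm
        · exact hx y hy'
      · refine List.pairwise_cons.mpr ⟨?_, h⟩
        intro y hy
        rcases List.mem_cons.mp hy with rfl | hy'
        · exact le_of_not_gt hxm
        · exact le_trans (le_of_not_gt hxm) (hx y hy')

def CoupleInv (h arr : List Int) : Prop :=
  hp h ∧ arr.Pairwise (· ≤ ·) ∧ (↑h : Multiset Int) = (↑arr : Multiset Int)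

theorem step_couple (h arr : List Int) (hne : h ≠ []) (hI : CoupleInv h arr) :
    CoupleInv (heappush (heappop h).2 (hGet h 0 + 1))
        (insSorted (PySem.List.slice arr (some 1) none) ((PySem.List.pyGet? arr 0).getD 0 + 1))
    ∧ heappush (heappop h).2 (hGet h 0 + 1) ≠ [] := by
  obtain ⟨hhp, hpw, hms⟩ := hI
  have harr : arr ≠ [] := by
    intro hemp
    rw [hemp] at hms
    simp only [Multiset.coe_nil, Multiset.coe_eq_zero] at hms
    exact hne hms
  obtain ⟨a0, rest, rfl⟩ : ∃ a0 rest, arr = a0 :: rest := by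
    cases arr with
    | nil => exact absurd rfl harr
    | cons a r => exact ⟨a, r, rfl⟩
  rw [PySem.List.slice_from_one]
  have hget0 : (PySem.List.pyGet? (a0 :: rest) 0).getD 0 = a0 := by
    simp [PySem.List.pyGet?, PySem.List.pyIdx?]
  rw [hget0]
  simp only [List.tail_cons]
  have hlen0 : 0 < h.length := List.length_pos_iff.mpr hne
  have hmem_h0 : hGet h 0 ∈ h := by
    have hg : hGet h 0 = h[0] := by
      simp [hGet, List.getD_eq_getElem?_getD, List.getElem?_eq_getElem hlen0]
    rw [hg]
    exact List.getElem_mem hlen0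
  have root_le := hp_root_min h hhp
  have ha0_min : ∀ y ∈ (a0 :: rest), a0 ≤ y := by
    intro y hy
    rcases List.mem_cons.mp hy with rfl | hy'
    · exact le_rfl
    · exact List.rel_of_pairwise_cons hpw hy'
  have h0_eq : hGet h 0 = a0 := by
    apply le_antisymm
    · apply root_le
      have h1 : a0 ∈ (↑(a0 :: rest) : Multiset Int) := by simp
      rw [← hms] at h1
      exact Multiset.mem_coe.mp h1
    · apply ha0_min
      have h1 : hGet h 0 ∈ (↑h : Multiset Int) := Multiset.mem_coe.mpr hmem_h0
      rw [hms] at h1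
      exact Multiset.mem_coe.mp h1
  have hpop := mset_heappop h hne
  rw [heappop_fst h hne, h0_eq] at hpop
  have hrest : (↑(heappop h).2 : Multiset Int) = (↑rest : Multiset Int) := by
    have hcons : (a0 ::ₘ (↑(heappop h).2 : Multiset Int)) = a0 ::ₘ (↑rest : Multiset Int) := by
      rw [← hpop, hms, ← Multiset.cons_coe]
    exact (Multiset.cons_inj_right a0).mp hcons
  refine ⟨⟨?_, ?_, ?_⟩, ?_⟩
  · exact heappush_hp _ _ (heappop_hp h hne hhp)
  · exact insSorted_pairwise _ _ (List.Pairwise.of_cons hpw)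
  · rw [mset_heappush, mset_insSorted, hrest, h0_eq]
  · intro hemp
    have hmm := mset_heappush (heappop h).2 (hGet h 0 + 1)
    rw [hemp] at hmm
    have hcard := congrArg Multiset.card hmm
    simp at hcard

theorem fold_couple (L : List Int) : ∀ (h arr : List Int), h ≠ [] → CoupleInv h arr →
    CoupleInv (L.foldl (fun h _ => heappush (heappop h).2 (hGet h 0 + 1)) h)
        (L.foldl (fun a _ => insSorted (PySem.List.slice a (some 1) none) ((PySem.List.pyGet? a 0).getD 0 + 1)) arr)
    ∧ (L.foldl (fun h _ => heappush (heappop h).2 (hGet h 0 + 1)) h) ≠ [] := by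
  induction L with
  | nil => intro h arr hne hI; exact ⟨hI, hne⟩
  | cons x t ih =>
      intro h arr hne hI
      simp only [List.foldl_cons]
      obtain ⟨hI', hne'⟩ := step_couple h arr hne hI
      exact ih _ _ hne' hI'

theorem prod_foldl (l : List Int) : l.foldl (fun r v => r * v) 1 = (↑l : Multiset Int).prod := by
  have aux : ∀ (l : List Int) (a : Int), l.foldl (fun r v => r * v) a = a * (↑l : Multiset Int).prod := by
    intro l
    induction l with
    | nil => intro a; simp
    | cons x t ih =>
        intro a
        simp only [List.foldl_cons, ih, ← Multiset.cons_coe, Multiset.prod_cons]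
        ring
  rw [aux]; ring

theorem main_eq (n : Int) (nums : List Int) (k : Int) (hpre : k ≤ 0 ∨ nums ≠ []) :
    solve n nums k = solve_alt n nums k := by
  simp only [solve, solve_alt]
  have hsortp : (PySem.List.sorted nums (fun x => x) false).Perm nums := PySem.List.sorted_perm nums (fun x => x) false
  have hmsort : (↑(PySem.List.sorted nums (fun x => x) false) : Multiset Int) = (↑nums : Multiset Int) :=
    Multiset.coe_eq_coe.mpr hsortp
  by_cases hk : k ≤ 0
  · have hr : PySem.List.pyRange 0 k 1 = [] := by
      rw [PySem.List.pyRange_one]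
      have hz : (k - 0).toNat = 0 := by omega
      rw [hz]
      rfl
    rw [hr]
    simp only [List.foldl_nil]
    have hmm : (↑(heapify nums) : Multiset Int) = (↑(PySem.List.sorted nums (fun x => x) false) : Multiset Int) := by
      rw [mset_heapify, hmsort]
    have hprod : (heapify nums).foldl (fun r i => r * i) 1
        = (PySem.List.sorted nums (fun x => x) false).foldl (fun r v => r * v) 1 := by
      rw [prod_foldl, prod_foldl, hmm]
    rw [hprod]
  · have hne : nums ≠ [] := hpre.resolve_left hk
    have hhne : heapify nums ≠ [] := by
      intro hemp
      have hmm := mset_heapify nums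
      rw [hemp] at hmm
      simp only [Multiset.coe_nil, Multiset.coe_eq_zero] at hmm
      exact hne (by simpa using hmm.symm)
    have hI : CoupleInv (heapify nums) (PySem.List.sorted nums (fun x => x) false) :=
      ⟨heapify_hp nums, PySem.List.sorted_pairwise nums (fun x => x), by rw [mset_heapify, hmsort]⟩
    obtain ⟨⟨_, _, hmfin⟩, _⟩ := fold_couple (PySem.List.pyRange 0 k 1) _ _ hhne hI
    have hprod := congrArg Multiset.prod hmfin
    rw [← prod_foldl, ← prod_foldl] at hprod
    rw [hprod]

-- ===== VERDICT (by name: the statement is the Claim_ definition above) =====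
theorem solve_spec : Claim_equal_solve := by
  intro n nums k hdom hpre
  show solve n nums k = solve_alt n nums k
  exact main_eq n nums k hpre
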